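-- pv_equiv track=rewrite | github.com/KostisAlexas/Game_Theory_LAB1_2025 | NE509_LAB1_2025_1093306_ASK1_SOURCE-CODE/template.py | valid_moves_for_column
-- ===== SOURCE A (Python) =====
-- def valid_moves_for_column(col, current_row, board_dict):
--     """
--     Επιστρέφει μια λίστα με έγκυρες γραμμές (ως αριθμούς) στις οποίες μπορεί να κινηθεί ο πύργος
--     στη στήλη col, δεδομένης της τρέχουσας θέσης current_row.
--
--     Η κίνηση επιτρέπεται μόνο κάθετα, προς τα πάνω ή προς τα κάτω, χωρίς να υπάρχουν
--     πύργοι (είτε δικός του είτε του αντιπάλου) στα ενδιάμεσα κελιά.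
--     """
--     moves = []
--     # Έλεγχος προς τα πάνω
--     row = current_row - 1
--     while row >= 1:
--         if (board_dict["GREEN"].get(col, None) == row) or (board_dict["RED"].get(col, None) == row):
--             break
--         moves.append(row)
--         row -= 1
--     # Έλεγχος προς τα κάτω
--     row = current_row + 1
--     while row <= 8:
--         if (board_dict["GREEN"].get(col, None) == row) or (board_dict["RED"].get(col, None) == row):
--             break
--         moves.append(row)
--         row += 1
--     return moves
-- ===== SOURCE B (Python) =====
-- def valid_moves_for_column(col, current_row, board_dict):
--     g = board_dict["GREEN"].get(col)
--     r = board_dict["RED"].get(col)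
--     above = max([b for b in (g, r) if b is not None and b < current_row] + [0])
--     below = min([b for b in (g, r) if b is not None and b > current_row] + [9])
--     return list(range(current_row - 1, above, -1)) + list(range(current_row + 1, below))
-- ===== Notes on version B (the rewrite author's own statement) =====
-- stated objective: simpler
-- what changed: B replaces A's two cell-by-cell while-loops (which re-query both dicts at every square) by reading the two possible blockers once, taking the nearest blocker above (max, default 0) and below (min, default 9), and emitting the two reachable segments directly as ranges; Pre_ requires both 'GREEN' and 'RED' keys, excluding the KeyError inputs plus the corner where A's 'or' short-circuits past a missing 'RED' key while B's up-front lookup raises.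
-- outside the precondition, e.g. on valid_moves_for_column(9, 8, {'GREEN': {9: 7}}): A returns [], B raises KeyError
import Mathlib
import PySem

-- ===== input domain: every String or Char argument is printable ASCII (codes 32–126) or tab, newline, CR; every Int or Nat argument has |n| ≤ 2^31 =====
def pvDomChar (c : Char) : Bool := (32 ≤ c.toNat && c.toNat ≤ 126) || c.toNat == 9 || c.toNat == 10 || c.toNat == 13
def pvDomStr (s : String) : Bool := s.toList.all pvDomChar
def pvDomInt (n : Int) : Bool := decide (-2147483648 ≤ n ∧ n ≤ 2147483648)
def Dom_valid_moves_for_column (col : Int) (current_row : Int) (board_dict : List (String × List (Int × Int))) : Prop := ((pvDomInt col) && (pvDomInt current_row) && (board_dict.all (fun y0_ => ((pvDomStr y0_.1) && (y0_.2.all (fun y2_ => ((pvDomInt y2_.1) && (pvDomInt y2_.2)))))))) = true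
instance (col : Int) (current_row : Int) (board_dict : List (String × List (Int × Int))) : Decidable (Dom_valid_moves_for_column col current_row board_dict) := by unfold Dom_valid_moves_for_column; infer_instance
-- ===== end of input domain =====

-- B replaces A's cell-by-cell while-loops by computing the nearest blocker above/below once
-- and emitting the two reachable ranges directly (objective: simpler; same output order).

-- ===== PORT A =====
-- board_dict["GREEN"].get(col, None) == row or board_dict["RED"].get(col, None) == row
-- (the lookups are re-evaluated each loop iteration, as in A; the KeyError case of
-- board_dict["GREEN"] is totalized with .getD [] and excluded by Pre_)
def pvAblocked (col : Int) (board_dict : List (String × List (Int × Int))) (row : Int) : Bool :=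
  (PySem.Dict.get? (PySem.Dict.ofList ((PySem.Dict.get? (PySem.Dict.ofList board_dict) "GREEN").getD [])) col == some row)
  || (PySem.Dict.get? (PySem.Dict.ofList ((PySem.Dict.get? (PySem.Dict.ofList board_dict) "RED").getD [])) col == some row)

-- while row >= 1: if blocked: break; moves.append(row); row -= 1
def pvAUp (col : Int) (board_dict : List (String × List (Int × Int))) (row : Int) : List Int :=
  if h : 1 ≤ row then
    if pvAblocked col board_dict row then []
    else row :: pvAUp col board_dict (row - 1)
  else []
termination_by row.toNat
decreasing_by omega

-- while row <= 8: if blocked: break; moves.append(row); row += 1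
def pvADown (col : Int) (board_dict : List (String × List (Int × Int))) (row : Int) : List Int :=
  if h : row ≤ 8 then
    if pvAblocked col board_dict row then []
    else row :: pvADown col board_dict (row + 1)
  else []
termination_by (9 - row).toNat
decreasing_by omega

def valid_moves_for_column (col : Int) (current_row : Int) (board_dict : List (String × List (Int × Int))) : List Int :=
  pvAUp col board_dict (current_row - 1) ++ pvADown col board_dict (current_row + 1)

-- ===== PORT B =====
def valid_moves_for_column_alt (col : Int) (current_row : Int) (board_dict : List (String × List (Int × Int))) : List Int :=
  let g := PySem.Dict.get? (PySem.Dict.ofList ((PySem.Dict.get? (PySem.Dict.ofList board_dict) "GREEN").getD [])) col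
  let r := PySem.Dict.get? (PySem.Dict.ofList ((PySem.Dict.get? (PySem.Dict.ofList board_dict) "RED").getD [])) col
  let above := (PySem.List.max? ((([g, r].filterMap id).filter (fun b => b < current_row)) ++ [0]) (fun x => x)).getD 0
  let below := (PySem.List.min? ((([g, r].filterMap id).filter (fun b => current_row < b)) ++ [9]) (fun x => x)).getD 9
  PySem.List.pyRange (current_row - 1) above (-1) ++ PySem.List.pyRange (current_row + 1) below 1

-- ===== PRECONDITION & SPEC =====
-- Pre_ requires both keys "GREEN" and "RED": without them A usually raises KeyError, except when a
-- blocker adjacent to current_row lets A's short-circuiting 'or' return [] without touching "RED";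
-- B looks both keys up front and raises there, so those inputs are excluded too.
def Pre_valid_moves_for_column (col : Int) (current_row : Int) (board_dict : List (String × List (Int × Int))) : Prop :=
  "GREEN" ∈ board_dict.map Prod.fst ∧ "RED" ∈ board_dict.map Prod.fst
instance (col : Int) (current_row : Int) (board_dict : List (String × List (Int × Int))) : Decidable (Pre_valid_moves_for_column col current_row board_dict) := by unfold Pre_valid_moves_for_column; infer_instance

def pvWitness_valid_moves_for_column : Int × Int × (List (String × List (Int × Int))) :=
  (3, 4, [("GREEN", [(3, 6)]), ("RED", [(3, 1), (5, 2)])])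

def Spec_valid_moves_for_column (col : Int) (current_row : Int) (board_dict : List (String × List (Int × Int))) (out : List Int) : Prop := out = valid_moves_for_column_alt col current_row board_dict
instance (col : Int) (current_row : Int) (board_dict : List (String × List (Int × Int))) (out : List Int) : Decidable (Spec_valid_moves_for_column col current_row board_dict out) := by unfold Spec_valid_moves_for_column; infer_instance

-- ===== CLAIM (what is proved, stated in full; the proofs are below) =====
def Claim_equal_valid_moves_for_column : Prop := ∀ (col : Int) (current_row : Int) (board_dict : List (String × List (Int × Int))), Dom_valid_moves_for_column col current_row board_dict → Pre_valid_moves_for_column col current_row board_dict → Spec_valid_moves_for_column col current_row board_dict (valid_moves_for_column col current_row board_dict)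

-- ===== LEMMAS AND PROOFS =====

theorem pvAUp_eq_pyRange (col : Int) (bd : List (String × List (Int × Int))) (stop : Int)
    (hstop0 : 0 ≤ stop) (hstopb : 1 ≤ stop → pvAblocked col bd stop = true) :
    ∀ (n : Nat) (row : Int), row.toNat ≤ n → (row < 1 ∨ stop ≤ row) →
      (∀ j, stop < j → j ≤ row → pvAblocked col bd j = false) →
      pvAUp col bd row = PySem.List.pyRange row stop (-1) := by
  intro n
  induction n with
  | zero =>
      intro row hn _ _
      have hrow : row < 1 := by omega
      rw [pvAUp, dif_neg (by omega), PySem.List.pyRange_neg_one_eq_nil (by omega)]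
  | succ n ih =>
      intro row hn hr hblock
      by_cases h1 : 1 ≤ row
      · by_cases hb : pvAblocked col bd row = true
        · have hle : row ≤ stop := by
            by_contra hlt
            have := hblock row (by omega) le_rfl
            simp [this] at hb
          rw [pvAUp, dif_pos h1, if_pos hb, PySem.List.pyRange_neg_one_eq_nil hle]
        · have hb' : pvAblocked col bd row = false := by
            cases hbe : pvAblocked col bd row
            · rfl
            · exact absurd hbe hb
          have hne : stop ≠ row := by
            intro he; subst he; exact hb (hstopb (by omega))
          have hlt : stop < row := by omega
          rw [pvAUp, dif_pos h1, if_neg hb, PySem.List.pyRange_neg_one_cons hlt]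
          have hrec := ih (row - 1) (by omega) (by omega)
            (fun j hj1 hj2 => hblock j hj1 (by omega))
          rw [hrec]
      · rw [pvAUp, dif_neg h1, PySem.List.pyRange_neg_one_eq_nil (by omega)]

theorem pvADown_eq_pyRange (col : Int) (bd : List (String × List (Int × Int))) (stop : Int)
    (hstop9 : stop ≤ 9) (hstopb : stop ≤ 8 → pvAblocked col bd stop = true) :
    ∀ (n : Nat) (row : Int), (9 - row).toNat ≤ n → (8 < row ∨ row ≤ stop) →
      (∀ j, row ≤ j → j < stop → pvAblocked col bd j = false) →
      pvADown col bd row = PySem.List.pyRange row stop 1 := by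
  intro n
  induction n with
  | zero =>
      intro row hn _ _
      have hrow : 8 < row := by omega
      rw [pvADown, dif_neg (by omega), PySem.List.pyRange_one_eq_nil (by omega)]
  | succ n ih =>
      intro row hn hr hblock
      by_cases h8 : row ≤ 8
      · by_cases hb : pvAblocked col bd row = true
        · have hle : stop ≤ row := by
            by_contra hlt
            have := hblock row le_rfl (by omega)
            simp [this] at hb
          rw [pvADown, dif_pos h8, if_pos hb, PySem.List.pyRange_one_eq_nil hle]
        · have hb' : pvAblocked col bd row = false := by
            cases hbe : pvAblocked col bd row
            · rfl
            · exact absurd hbe hb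
          have hne : stop ≠ row := by
            intro he; subst he; exact hb (hstopb (by omega))
          have hlt : row < stop := by omega
          rw [pvADown, dif_pos h8, if_neg hb, PySem.List.pyRange_one_cons hlt]
          have hrec := ih (row + 1) (by omega) (by omega)
            (fun j hj1 hj2 => hblock j (by omega) hj2)
          rw [hrec]
      · rw [pvADown, dif_neg h8, PySem.List.pyRange_one_eq_nil (by omega)]

-- membership in B's candidate pair list characterizes "some blocker equals b"
theorem pv_mem_pair (g r : Option Int) (b : Int) :
    b ∈ ([g, r].filterMap id) ↔ ((g == some b) || (r == some b)) = true := by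
  cases g <;> cases r <;> simp [List.filterMap] <;> tauto

-- ===== VERDICT (by name: the statement is the Claim_ definition above) =====
theorem valid_moves_for_column_spec : Claim_equal_valid_moves_for_column := by
  unfold Claim_equal_valid_moves_for_column
  intro col current_row bd _ _
  unfold Spec_valid_moves_for_column
  simp only [valid_moves_for_column, valid_moves_for_column_alt]
  set g := PySem.Dict.get? (PySem.Dict.ofList ((PySem.Dict.get? (PySem.Dict.ofList bd) "GREEN").getD [])) col with hg
  set r := PySem.Dict.get? (PySem.Dict.ofList ((PySem.Dict.get? (PySem.Dict.ofList bd) "RED").getD [])) col with hr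
  have hmemiff : ∀ b : Int, b ∈ ([g, r].filterMap id) ↔ pvAblocked col bd b = true := by
    intro b
    rw [pv_mem_pair, pvAblocked, ← hg, ← hr]
  set upL := ([g, r].filterMap id).filter (fun b => b < current_row) ++ [(0 : Int)] with hupL
  set downL := ([g, r].filterMap id).filter (fun b => current_row < b) ++ [(9 : Int)] with hdownL
  obtain ⟨above, habove⟩ : ∃ m, PySem.List.max? upL (fun x => x) = some m := by
    cases he : PySem.List.max? upL (fun x => x)
    · exact absurd ((PySem.List.max?_eq_none_iff _ _).mp he) (by simp [hupL])
    · exact ⟨_, rfl⟩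
  have habove_mem : above ∈ upL := PySem.List.max?_mem habove
  have habove_max : ∀ y ∈ upL, y ≤ above := PySem.List.max?_isMax habove
  have habove0 : 0 ≤ above := habove_max 0 (by simp [hupL])
  have habove_cases : above = 0 ∨ (pvAblocked col bd above = true ∧ above < current_row) := by
    rcases List.mem_append.mp habove_mem with h | h
    · right
      exact ⟨(hmemiff above).mp (List.mem_filter.mp h).1, by simpa using (List.mem_filter.mp h).2⟩
    · left; simpa using h
  obtain ⟨below, hbelow⟩ : ∃ m, PySem.List.min? downL (fun x => x) = some m := by
    cases he : PySem.List.min? downL (fun x => x)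
    · exact absurd ((PySem.List.min?_eq_none_iff _ _).mp he) (by simp [hdownL])
    · exact ⟨_, rfl⟩
  have hbelow_mem : below ∈ downL := PySem.List.min?_mem hbelow
  have hbelow_min : ∀ y ∈ downL, below ≤ y := PySem.List.min?_isMin hbelow
  have hbelow9 : below ≤ 9 := hbelow_min 9 (by simp [hdownL])
  have hbelow_cases : below = 9 ∨ (pvAblocked col bd below = true ∧ current_row < below) := by
    rcases List.mem_append.mp hbelow_mem with h | h
    · right
      exact ⟨(hmemiff below).mp (List.mem_filter.mp h).1, by simpa using (List.mem_filter.mp h).2⟩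
    · left; simpa using h
  rw [habove, hbelow]
  simp only [Option.getD_some]
  congr 1
  · apply pvAUp_eq_pyRange col bd above habove0 _ (current_row - 1).toNat (current_row - 1) le_rfl _ _
    · intro h1
      rcases habove_cases with h | h
      · omega
      · exact h.1
    · rcases habove_cases with h | h
      · omega
      · omega
    · intro j hj1 hj2
      cases hbj : pvAblocked col bd j
      · rfl
      · exfalso
        have hjc : j ∈ upL := by
          rw [hupL]
          exact List.mem_append.mpr (Or.inl (List.mem_filter.mpr ⟨(hmemiff j).mpr hbj, by simp; omega⟩))
        have := habove_max j hjc
        omega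
  · apply pvADown_eq_pyRange col bd below hbelow9 _ (9 - (current_row + 1)).toNat (current_row + 1) le_rfl _ _
    · intro h8
      rcases hbelow_cases with h | h
      · omega
      · exact h.1
    · rcases hbelow_cases with h | h
      · omega
      · omega
    · intro j hj1 hj2
      cases hbj : pvAblocked col bd j
      · rfl
      · exfalso
        have hjc : j ∈ downL := by
          rw [hdownL]
          exact List.mem_append.mpr (Or.inl (List.mem_filter.mpr ⟨(hmemiff j).mpr hbj, by simp; omega⟩))
        have := hbelow_min j hjc
        omega
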